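-- pv_equiv track=rewrite | github.com/jsg921019/algorithm_study | recursion/쿼드압축_후_개수_세기.py | solution
-- ===== SOURCE A (Python) =====
-- from itertools import product
--
-- def solution(arr):
--
--     def recursion(size, i, j):
--
--         if size == 0:
--             return [0, 1] if arr[i][j] else [1, 0]
--
--         r = [recursion(size//2, i_, j_) for i_, j_ in product([i, i+size], [j, j+size])]
--
--         if all(r[i][1] == 0 for i in range(4)):
--             return [1, 0]
--
--         if all(r[i][0] == 0 for i in range(4)):
--             return [0, 1]
--
--         return [sum(r[i][j] for i in range(4)) for j in [0, 1]]
--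
--     return recursion(len(arr)//2, 0, 0)
-- ===== SOURCE B (Python) =====
-- def solution(arr):
--     def cells(size, i, j):
--         if size == 0:
--             return [arr[i][j]]
--         h = size // 2
--         return cells(h, i, j) + cells(h, i, j + size) + cells(h, i + size, j) + cells(h, i + size, j + size)
--
--     def count(size, i, j):
--         vals = cells(size, i, j)
--         if all(vals):
--             return [0, 1]
--         if not any(vals):
--             return [1, 0]
--         h = size // 2
--         quads = [count(h, i, j), count(h, i, j + size), count(h, i + size, j), count(h, i + size, j + size)]
--         return [sum(q[0] for q in quads), sum(q[1] for q in quads)]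
--
--     return count(len(arr) // 2, 0, 0)
-- ===== Notes on version B (the rewrite author's own statement) =====
-- stated objective: alternative
-- what changed: B replaces A's bottom-up merge of the four children's [zeros, ones] pairs by a top-down test: it gathers all cells of the current block and checks all-truthy / all-falsy to emit a leaf, recursing into the four quadrants only for mixed blocks.
import Mathlib
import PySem

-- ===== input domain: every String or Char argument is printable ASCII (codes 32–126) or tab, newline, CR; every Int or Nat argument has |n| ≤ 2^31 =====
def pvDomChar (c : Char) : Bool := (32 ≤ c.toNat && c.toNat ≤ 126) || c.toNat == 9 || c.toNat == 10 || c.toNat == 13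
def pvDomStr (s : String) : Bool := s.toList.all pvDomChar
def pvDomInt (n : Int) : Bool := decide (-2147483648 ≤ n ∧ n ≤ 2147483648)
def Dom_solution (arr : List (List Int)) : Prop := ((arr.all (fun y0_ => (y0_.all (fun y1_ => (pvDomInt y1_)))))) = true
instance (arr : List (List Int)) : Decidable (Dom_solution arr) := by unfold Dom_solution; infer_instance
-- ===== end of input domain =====

-- B replaces A's bottom-up merge of child [zeros, ones] pairs by a top-down
-- uniformity scan of each block (alternative decomposition, no speed claim).

-- shared cell access arr[i][j] (indices are nonnegative here; Pre_ keeps them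
-- in range, where Python indexing equals getD; out of range Python raises)
def pvCell (arr : List (List Int)) (i j : Nat) : Int :=
  ((arr.getD i []).getD j 0)

-- r[k][l] for the 2-element result lists (indices 0/1 always in range: exact)
def pvIdx (xs : List Int) (k : Nat) : Int := xs.getD k 0

-- ===== PORT A =====
def recA (arr : List (List Int)) (size i j : Nat) : List Int :=
  if h : size = 0 then
    (if pvCell arr i j ≠ 0 then [0, 1] else [1, 0])
  else
    -- product([i, i+size], [j, j+size]) order
    let r0 := recA arr (size / 2) i j
    let r1 := recA arr (size / 2) i (j + size)
    let r2 := recA arr (size / 2) (i + size) j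
    let r3 := recA arr (size / 2) (i + size) (j + size)
    if pvIdx r0 1 = 0 ∧ pvIdx r1 1 = 0 ∧ pvIdx r2 1 = 0 ∧ pvIdx r3 1 = 0 then [1, 0]
    else if pvIdx r0 0 = 0 ∧ pvIdx r1 0 = 0 ∧ pvIdx r2 0 = 0 ∧ pvIdx r3 0 = 0 then [0, 1]
    else [pvIdx r0 0 + pvIdx r1 0 + pvIdx r2 0 + pvIdx r3 0,
          pvIdx r0 1 + pvIdx r1 1 + pvIdx r2 1 + pvIdx r3 1]
termination_by size
decreasing_by all_goals exact Nat.div_lt_self (Nat.pos_of_ne_zero h) (by norm_num)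

def solution (arr : List (List Int)) : List Int := recA arr (arr.length / 2) 0 0

-- ===== PORT B =====
def cellsB (arr : List (List Int)) (size i j : Nat) : List Int :=
  if size = 0 then [pvCell arr i j]
  else
    cellsB arr (size / 2) i j ++ cellsB arr (size / 2) i (j + size) ++
    cellsB arr (size / 2) (i + size) j ++ cellsB arr (size / 2) (i + size) (j + size)
termination_by size
decreasing_by all_goals exact Nat.div_lt_self (Nat.pos_of_ne_zero (by assumption)) (by norm_num)

lemma cellsB_zero_ne (arr : List (List Int)) (i j : Nat)
    (h1 : ¬ ((cellsB arr 0 i j).all (fun v => decide (v ≠ 0)) = true))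
    (h2 : ¬ ((cellsB arr 0 i j).all (fun v => decide (v = 0)) = true)) : False := by
  simp [cellsB] at h1 h2; exact h2 h1

def countB (arr : List (List Int)) (size i j : Nat) : List Int :=
  let vals := cellsB arr size i j
  if h1 : vals.all (fun v => decide (v ≠ 0)) = true then [0, 1]
  else if h2 : vals.all (fun v => decide (v = 0)) = true then [1, 0]
  else
    let q0 := countB arr (size / 2) i j
    let q1 := countB arr (size / 2) i (j + size)
    let q2 := countB arr (size / 2) (i + size) j
    let q3 := countB arr (size / 2) (i + size) (j + size)
    [pvIdx q0 0 + pvIdx q1 0 + pvIdx q2 0 + pvIdx q3 0,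
     pvIdx q0 1 + pvIdx q1 1 + pvIdx q2 1 + pvIdx q3 1]
termination_by size
decreasing_by all_goals
  exact Nat.div_lt_self
    (Nat.pos_of_ne_zero (fun e => cellsB_zero_ne arr i j (e ▸ h1) (e ▸ h2)))
    (by norm_num)

def solution_alt (arr : List (List Int)) : List Int := countB arr (arr.length / 2) 0 0

-- ===== PRECONDITION & SPEC =====
-- the row/column offsets the quadtree recursion touches, as a function of the start size
-- structural (fuel = s suffices since the size halves), so that Pre_ is kernel-decidable
def offsAux : Nat → Nat → List Nat
  | _, 0 => [0]
  | 0, _ + 1 => [0]      -- unreachable when fuel ≥ s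
  | f + 1, s + 1 => offsAux f ((s + 1) / 2) ++ (offsAux f ((s + 1) / 2)).map (· + (s + 1))

def offs (s : Nat) : List Nat := offsAux s s

-- Pre_ holds exactly when every cell the Python recursion indexes exists (else A raises IndexError)
def Pre_solution (arr : List (List Int)) : Prop :=
  ∀ r ∈ offs (arr.length / 2), ∀ c ∈ offs (arr.length / 2),
    r < arr.length ∧ c < (arr.getD r []).length
instance (arr : List (List Int)) : Decidable (Pre_solution arr) := by
  unfold Pre_solution; infer_instance

def pvWitness_solution : List (List Int) := [[0, 1], [1, 1]]

def Spec_solution (arr : List (List Int)) (out : List Int) : Prop := out = solution_alt arr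
instance (arr : List (List Int)) (out : List Int) : Decidable (Spec_solution arr out) := by unfold Spec_solution; infer_instance

-- ===== CLAIM (what is proved, stated in full; the proofs are below) =====
def Claim_equal_solution : Prop := ∀ (arr : List (List Int)), Dom_solution arr → Pre_solution arr → Spec_solution arr (solution arr)

-- ===== LEMMAS AND PROOFS =====


lemma cellsB_ne_nil (arr : List (List Int)) : ∀ (size : Nat) (i j : Nat), cellsB arr size i j ≠ [] := by
  intro size
  induction size using Nat.strong_induction_on with
  | _ size ih =>
    intro i j
    by_cases hs : size = 0
    · subst hs; simp [cellsB]
    · rw [cellsB]; simp only [hs, if_false]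
      have := ih (size / 2) (Nat.div_lt_self (Nat.pos_of_ne_zero hs) (by norm_num)) i j
      simp [List.append_eq_nil_iff]
      intro h; exact absurd h this

lemma key (arr : List (List Int)) : ∀ (size : Nat) (i j : Nat),
    recA arr size i j = countB arr size i j ∧
    ∃ z o : Int, recA arr size i j = [z, o] ∧ 0 ≤ z ∧ 0 ≤ o ∧
      ((z = 0) ↔ (cellsB arr size i j).all (fun v => decide (v ≠ 0)) = true) ∧
      ((o = 0) ↔ (cellsB arr size i j).all (fun v => decide (v = 0)) = true) := by
  intro size
  induction size using Nat.strong_induction_on with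
  | _ size ih =>
    intro i j
    by_cases hs : size = 0
    · subst hs
      by_cases hv : pvCell arr i j = 0
      · rw [recA, countB]; simp [cellsB, hv]
      · rw [recA, countB]; simp [cellsB, hv]
    · have hlt : size / 2 < size := Nat.div_lt_self (Nat.pos_of_ne_zero hs) (by norm_num)
      obtain ⟨e0, z0, o0, r0eq, hz0, ho0, it0, if0⟩ := ih (size / 2) hlt i j
      obtain ⟨e1, z1, o1, r1eq, hz1, ho1, it1, if1⟩ := ih (size / 2) hlt i (j + size)
      obtain ⟨e2, z2, o2, r2eq, hz2, ho2, it2, if2⟩ := ih (size / 2) hlt (i + size) j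
      obtain ⟨e3, z3, o3, r3eq, hz3, ho3, it3, if3⟩ := ih (size / 2) hlt (i + size) (j + size)
      have hc : cellsB arr size i j =
          cellsB arr (size / 2) i j ++ cellsB arr (size / 2) i (j + size) ++
          cellsB arr (size / 2) (i + size) j ++ cellsB arr (size / 2) (i + size) (j + size) := by
        rw [cellsB]; simp [hs]
      have hT : (cellsB arr size i j).all (fun v => decide (v ≠ 0)) = true ↔
          ((cellsB arr (size / 2) i j).all (fun v => decide (v ≠ 0)) = true ∧
           (cellsB arr (size / 2) i (j + size)).all (fun v => decide (v ≠ 0)) = true ∧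
           (cellsB arr (size / 2) (i + size) j).all (fun v => decide (v ≠ 0)) = true ∧
           (cellsB arr (size / 2) (i + size) (j + size)).all (fun v => decide (v ≠ 0)) = true) := by
        rw [hc]; simp [List.all_append]
      have hF : (cellsB arr size i j).all (fun v => decide (v = 0)) = true ↔
          ((cellsB arr (size / 2) i j).all (fun v => decide (v = 0)) = true ∧
           (cellsB arr (size / 2) i (j + size)).all (fun v => decide (v = 0)) = true ∧
           (cellsB arr (size / 2) (i + size) j).all (fun v => decide (v = 0)) = true ∧
           (cellsB arr (size / 2) (i + size) (j + size)).all (fun v => decide (v = 0)) = true) := by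
        rw [hc]; simp [List.all_append]
      -- a nonempty block cannot be both all-zero and all-nonzero
      have hTF : ¬((cellsB arr (size / 2) i j).all (fun v => decide (v ≠ 0)) = true ∧
                   (cellsB arr (size / 2) i j).all (fun v => decide (v = 0)) = true) := by
        rcases List.exists_mem_of_ne_nil _ (cellsB_ne_nil arr (size / 2) i j) with ⟨v, hv⟩
        rintro ⟨h1, h2⟩
        have := List.all_eq_true.mp h1 v hv
        have := List.all_eq_true.mp h2 v hv
        simp_all
      have hrec : recA arr size i j =
          (if o0 = 0 ∧ o1 = 0 ∧ o2 = 0 ∧ o3 = 0 then [1, 0]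
           else if z0 = 0 ∧ z1 = 0 ∧ z2 = 0 ∧ z3 = 0 then [0, 1]
           else [z0 + z1 + z2 + z3, o0 + o1 + o2 + o3]) := by
        rw [recA]; simp only [hs, dite_false]
        rw [r0eq, r1eq, r2eq, r3eq]
        simp [pvIdx]
      by_cases cF : o0 = 0 ∧ o1 = 0 ∧ o2 = 0 ∧ o3 = 0
      · -- every child block is uniformly zero: B's all-falsy scan fires
        have aF : (cellsB arr size i j).all (fun v => decide (v = 0)) = true :=
          hF.mpr ⟨if0.mp cF.1, if1.mp cF.2.1, if2.mp cF.2.2.1, if3.mp cF.2.2.2⟩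
        have aTne : ¬ ((cellsB arr size i j).all (fun v => decide (v ≠ 0)) = true) :=
          fun hx => hTF ⟨(hT.mp hx).1, if0.mp cF.1⟩
        have hcount : countB arr size i j = [1, 0] := by
          rw [countB]; simp only [dif_neg aTne, dif_pos aF]
        rw [hrec, if_pos cF, hcount]
        exact ⟨rfl, 1, 0, rfl, by norm_num, le_refl 0,
          iff_of_false (by norm_num) aTne, iff_of_true rfl aF⟩
      · by_cases cT : z0 = 0 ∧ z1 = 0 ∧ z2 = 0 ∧ z3 = 0
        · -- every child block is uniformly nonzero: B's all-truthy scan fires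
          have aT : (cellsB arr size i j).all (fun v => decide (v ≠ 0)) = true :=
            hT.mpr ⟨it0.mp cT.1, it1.mp cT.2.1, it2.mp cT.2.2.1, it3.mp cT.2.2.2⟩
          have aFne : ¬ ((cellsB arr size i j).all (fun v => decide (v = 0)) = true) :=
            fun hx => cF ⟨if0.mpr (hF.mp hx).1, if1.mpr (hF.mp hx).2.1,
                          if2.mpr (hF.mp hx).2.2.1, if3.mpr (hF.mp hx).2.2.2⟩
          have hcount : countB arr size i j = [0, 1] := by
            rw [countB]; simp only [dif_pos aT]
          rw [hrec, if_neg cF, if_pos cT, hcount]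
          exact ⟨rfl, 0, 1, rfl, le_refl 0, by norm_num,
            iff_of_true rfl aT, iff_of_false (by norm_num) aFne⟩
        · -- mixed block: both of B's scans fail and B recurses
          have aTne : ¬ ((cellsB arr size i j).all (fun v => decide (v ≠ 0)) = true) :=
            fun hx => cT ⟨it0.mpr (hT.mp hx).1, it1.mpr (hT.mp hx).2.1,
                          it2.mpr (hT.mp hx).2.2.1, it3.mpr (hT.mp hx).2.2.2⟩
          have aFne : ¬ ((cellsB arr size i j).all (fun v => decide (v = 0)) = true) :=
            fun hx => cF ⟨if0.mpr (hF.mp hx).1, if1.mpr (hF.mp hx).2.1,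
                          if2.mpr (hF.mp hx).2.2.1, if3.mpr (hF.mp hx).2.2.2⟩
          have hcount : countB arr size i j =
              [z0 + z1 + z2 + z3, o0 + o1 + o2 + o3] := by
            rw [countB]; simp only [dif_neg aTne, dif_neg aFne]
            rw [← e0, ← e1, ← e2, ← e3, r0eq, r1eq, r2eq, r3eq]
            simp [pvIdx]
          rw [hrec, if_neg cF, if_neg cT, hcount]
          refine ⟨rfl, z0 + z1 + z2 + z3, o0 + o1 + o2 + o3, rfl, by omega, by omega, ?_, ?_⟩
          · rw [hT]
            constructor
            · intro h
              have hz : z0 = 0 ∧ z1 = 0 ∧ z2 = 0 ∧ z3 = 0 := by omega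
              exact ⟨it0.mp hz.1, it1.mp hz.2.1, it2.mp hz.2.2.1, it3.mp hz.2.2.2⟩
            · rintro ⟨h0, h1, h2, h3⟩
              have := it0.mpr h0
              have := it1.mpr h1
              have := it2.mpr h2
              have := it3.mpr h3
              omega
          · rw [hF]
            constructor
            · intro h
              have ho : o0 = 0 ∧ o1 = 0 ∧ o2 = 0 ∧ o3 = 0 := by omega
              exact ⟨if0.mp ho.1, if1.mp ho.2.1, if2.mp ho.2.2.1, if3.mp ho.2.2.2⟩
            · rintro ⟨h0, h1, h2, h3⟩
              have := if0.mpr h0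
              have := if1.mpr h1
              have := if2.mpr h2
              have := if3.mpr h3
              omega

theorem solution_spec : Claim_equal_solution := by
  intro arr _ _
  unfold Spec_solution solution solution_alt
  exact (key arr (arr.length / 2) 0 0).1
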